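-- pv_equiv track=rewrite | github.com/great-expectations/great_expectations | scripts/dependency_graph_testing/graph.py | traverse_graph
-- ===== SOURCE A (Python) =====
-- from typing import Dict, List, Optional
--
-- def traverse_graph(root: str, graph: Dict[str, List[str]], depth: int) -> List[str]:
--     """
--     Perform an iterative, DFS-based traversal of a given dependency graph.
--
--     The provided `depth` arg determines how many layers you want to traverse. The smaller the number, the
--     more relevant the matches (but the less overall coverage you obtain).
--
--     The output is a series of files that are determined to be relevant to the root file.
--     """
--     stack = [(root, depth)]
--     seen = set()
--
--     while stack:
--         node, d = stack.pop()
--         # If we've hit a cycle, traversed past our stated depth, or touched a file that isn't GE, throw away the node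
--         if node in seen or d <= 0 or not node.startswith("great_expectations"):
--             continue
--         seen.add(node)
--         for child in graph.get(node, []):
--             stack.append((child, d - 1))
--
--     return sorted(seen)
-- ===== SOURCE B (Python) =====
-- def traverse_graph(root: str, graph, depth: int):
--     """Recursive DFS with the seen/depth/prefix check at call entry, visiting
--     children last-first; same visitation order as A's LIFO edge stack, but
--     decomposed as structural recursion instead of an explicit stack loop."""
--     seen = set()
--
--     def visit(node, d):
--         if node in seen or d <= 0 or not node.startswith("great_expectations"):
--             return
--         seen.add(node)
--         for child in reversed(graph.get(node, [])):
--             visit(child, d - 1)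
--
--     visit(root, depth)
--     return sorted(seen)
-- ===== Notes on version B (the rewrite author's own statement) =====
-- stated objective: alternative
-- what changed: Replaces A's iterative edge-stack DFS (one (child, depth) stack entry per edge, seen/depth/prefix checks applied at pop time) with a recursive DFS that applies the checks at call entry and recurses over each node's children last-first, reproducing A's exact visitation order without any explicit stack.
import Mathlib
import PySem

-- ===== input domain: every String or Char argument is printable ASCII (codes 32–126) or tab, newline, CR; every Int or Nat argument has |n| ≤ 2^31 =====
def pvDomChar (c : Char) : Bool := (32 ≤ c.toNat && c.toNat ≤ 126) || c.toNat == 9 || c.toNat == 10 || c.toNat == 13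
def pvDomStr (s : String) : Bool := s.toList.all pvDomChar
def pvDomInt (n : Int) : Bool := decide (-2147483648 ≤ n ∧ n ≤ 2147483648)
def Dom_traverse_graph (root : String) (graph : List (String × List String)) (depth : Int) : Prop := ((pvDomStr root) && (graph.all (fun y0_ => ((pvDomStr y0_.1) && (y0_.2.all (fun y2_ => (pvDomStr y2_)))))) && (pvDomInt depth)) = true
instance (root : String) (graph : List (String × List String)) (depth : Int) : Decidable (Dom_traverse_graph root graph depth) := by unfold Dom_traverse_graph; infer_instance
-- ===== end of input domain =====

-- B replaces A's iterative edge-stack DFS (pop-time checks) by a recursive DFS with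
-- call-entry checks over children taken last-first; same return value, similar cost
-- (objective: alternative).

-- ===== PORT A =====
-- termination helpers and lemmas for A's while loop (cited by decreasing_by; they do not change the computation)

lemma pvFilterMono {α : Type} (p q : α → Bool) (h : ∀ x, q x = true → p x = true) (l : List α) :
    (l.filter q).length ≤ (l.filter p).length := by
  induction l with
  | nil => simp
  | cons a t ih =>
    simp only [List.filter_cons]
    cases hq : q a with
    | true => simp [h a hq]; omega
    | false => cases hp : p a <;> simp <;> omega

lemma pvFilterStrict {α : Type} (p q : α → Bool) (h : ∀ x, q x = true → p x = true) (a : α)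
    (l : List α) (ha : a ∈ l) (hpa : p a = true) (hqa : q a = false) :
    (l.filter q).length < (l.filter p).length := by
  induction l with
  | nil => cases ha
  | cons b t ih =>
    simp only [List.filter_cons]
    by_cases hb : b = a
    · subst hb
      simp only [hpa, hqa]
      simpa using Nat.lt_succ_of_le (pvFilterMono p q h t)
    · have ha' : a ∈ t := by
        rcases List.mem_cons.mp ha with h1 | h1
        · exact absurd h1.symm hb
        · exact h1
      have hs := ih ha'
      cases hq : q b with
      | true => simp [h b hq]; omega
      | false => cases hp : p b <;> simp <;> omega

def pvUnivA (graph : List (String × List String)) : List String :=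
  PySem.List.dedup (graph.flatMap (fun p => p.1 :: p.2))
def pvEdgesA (graph : List (String × List String)) : Nat :=
  (graph.map (fun p => p.2.length)).sum
def pvUnseenA (graph : List (String × List String)) (seen : List String) : Nat :=
  ((pvUnivA graph).filter (fun n => !(seen.contains n))).length

lemma pvGetD_len_le (graph : List (String × List String)) (node : String) :
    ((PySem.Dict.mk graph).getD node []).length ≤ pvEdgesA graph := by
  induction graph with
  | nil => simp [PySem.Dict.getD, PySem.Dict.get?, pvEdgesA]
  | cons p t ih =>
    obtain ⟨k, v⟩ := p
    rw [PySem.Dict.getD_eq_get?_getD, PySem.Dict.get?_mk_cons]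
    simp only [pvEdgesA, List.map_cons, List.sum_cons]
    by_cases hk : (k == node) = true
    · simp [hk]
    · have hk' : (k == node) = false := by simpa using hk
      simp only [hk', Bool.false_eq_true, if_false]
      rw [← PySem.Dict.getD_eq_get?_getD]
      have := ih
      simp only [pvEdgesA] at this
      omega

lemma pvGetD_notmem (graph : List (String × List String)) (node : String)
    (h : node ∉ pvUnivA graph) : (PySem.Dict.mk graph).getD node [] = [] := by
  induction graph with
  | nil => simp [PySem.Dict.getD, PySem.Dict.get?]
  | cons p t ih =>
    obtain ⟨k, v⟩ := p
    simp only [pvUnivA, PySem.List.mem_dedup, List.flatMap_cons, List.mem_append,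
      List.mem_cons] at h
    push Not at h
    rw [PySem.Dict.getD_eq_get?_getD, PySem.Dict.get?_mk_cons]
    have hk : (k == node) = false := by
      simp only [beq_eq_false_iff_ne]
      exact fun e => h.1.1 e.symm
    simp only [hk, Bool.false_eq_true, if_false]
    rw [← PySem.Dict.getD_eq_get?_getD]
    apply ih
    simp only [pvUnivA, PySem.List.mem_dedup]
    exact fun hm => h.2 hm

lemma pvContains_add_self (seen : List String) (x : String) :
    (PySem.Set.add seen x).contains x = true := by
  have h2 : x ∈ PySem.Set.add seen x := (PySem.Set.mem_add _ _ _).mpr (Or.inr rfl)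
  simpa using h2

lemma pvUnseen_add_le (graph : List (String × List String)) (seen : List String) (x : String) :
    pvUnseenA graph (PySem.Set.add seen x) ≤ pvUnseenA graph seen := by
  apply pvFilterMono
  intro n hn
  cases hcs : seen.contains n with
  | false => simp
  | true =>
    have h1 : n ∈ seen := by simpa using hcs
    simp [PySem.Set.mem_add, h1] at hn

lemma pvUnseen_add_lt (graph : List (String × List String)) (seen : List String) (x : String)
    (hx : x ∈ pvUnivA graph) (hc : seen.contains x = false) :
    pvUnseenA graph (PySem.Set.add seen x) < pvUnseenA graph seen := by
  apply pvFilterStrict _ _ _ x _ hx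
  · simpa using hc
  · have h2 := pvContains_add_self seen x
    simpa using h2
  · intro n hn
    cases hcs : seen.contains n with
    | false => simp
    | true =>
      have h1 : n ∈ seen := by simpa using hcs
      simp [PySem.Set.mem_add, h1] at hn

-- the while loop of A; the stack keeps its top at the HEAD (Python appends/pops at the end),
-- so 'for child in children: stack.append((child, d-1))' pushes the reversed child list in front
def pvLoopA (graph : List (String × List String)) (stack : List (String × Int)) (seen : PySem.Set String) : PySem.Set String :=
  match stack with
  | [] => seen
  | (node, d) :: rest =>
    if seen.contains node = true ∨ d ≤ 0 ∨ PySem.Str.startswith node "great_expectations" = false then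
      pvLoopA graph rest seen
    else
      pvLoopA graph
        (((PySem.Dict.getD (PySem.Dict.mk graph) node []).map (fun c => (c, d - 1))).reverse ++ rest)
        (PySem.Set.add seen node)
termination_by (pvEdgesA graph + 1) * pvUnseenA graph seen + stack.length
decreasing_by
  · simp only [List.length_cons]; omega
  · rename_i h
    have hc : seen.contains node = false := by
      rcases Bool.eq_false_or_eq_true (seen.contains node) with h1 | h1
      · exact absurd (Or.inl h1) h
      · exact h1
    simp only [List.length_append, List.length_reverse, List.length_map, List.length_cons]
    by_cases hu : node ∈ pvUnivA graph
    · have h1 := pvUnseen_add_lt graph seen node hu hc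
      have h2 := pvGetD_len_le graph node
      have h3 : (pvEdgesA graph + 1) * (pvUnseenA graph (PySem.Set.add seen node) + 1) ≤
          (pvEdgesA graph + 1) * pvUnseenA graph seen := Nat.mul_le_mul_left _ h1
      rw [Nat.mul_succ] at h3
      omega
    · have h0 := pvGetD_notmem graph node hu
      have hle := pvUnseen_add_le graph seen node
      have h3 : (pvEdgesA graph + 1) * pvUnseenA graph (PySem.Set.add seen node) ≤
          (pvEdgesA graph + 1) * pvUnseenA graph seen := Nat.mul_le_mul_left _ hle
      simp only [h0, List.length_nil]
      omega

def traverse_graph (root : String) (graph : List (String × List String)) (depth : Int) : List String :=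
  PySem.List.sorted (pvLoopA graph [(root, depth)] PySem.Set.empty) (fun x => x) false

-- ===== PORT B =====
-- the recursive visit of B: pvVisit is 'visit(node, d)', pvVisitList its 'for child in reversed(...)' loop
mutual
def pvVisit (graph : List (String × List String)) (node : String) (d : Int) (seen : PySem.Set String) : PySem.Set String :=
  if seen.contains node = true ∨ d ≤ 0 ∨ PySem.Str.startswith node "great_expectations" = false then
    seen
  else
    pvVisitList graph ((PySem.Dict.getD (PySem.Dict.mk graph) node []).reverse) (d - 1) (PySem.Set.add seen node)
termination_by (d.toNat, 0)
decreasing_by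
  rename_i h
  have hd : ¬ d ≤ 0 := fun h0 => h (Or.inr (Or.inl h0))
  apply Prod.Lex.left
  omega
def pvVisitList (graph : List (String × List String)) (cs : List String) (d : Int) (seen : PySem.Set String) : PySem.Set String :=
  match cs with
  | [] => seen
  | c :: rest => pvVisitList graph rest d (pvVisit graph c d seen)
termination_by (d.toNat, cs.length + 1)
decreasing_by
  · apply Prod.Lex.right
    simp only [List.length_cons]
    omega
  · apply Prod.Lex.right
    simp only [List.length_cons]
    omega
end

def traverse_graph_alt (root : String) (graph : List (String × List String)) (depth : Int) : List String :=
  PySem.List.sorted (pvVisit graph root depth PySem.Set.empty) (fun x => x) false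

-- ===== PRECONDITION & SPEC =====
def Spec_traverse_graph (root : String) (graph : List (String × List String)) (depth : Int) (out : List String) : Prop := out = traverse_graph_alt root graph depth
instance (root : String) (graph : List (String × List String)) (depth : Int) (out : List String) : Decidable (Spec_traverse_graph root graph depth out) := by unfold Spec_traverse_graph; infer_instance

-- ===== CLAIM (what is proved, stated in full; the proofs are below) =====
def Claim_equal_traverse_graph : Prop := ∀ (root : String) (graph : List (String × List String)) (depth : Int), Dom_traverse_graph root graph depth → Spec_traverse_graph root graph depth (traverse_graph root graph depth)

-- ===== LEMMAS AND PROOFS =====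

lemma pvLoopA_nil (graph : List (String × List String)) (seen : PySem.Set String) :
    pvLoopA graph [] seen = seen := by
  rw [pvLoopA]

lemma pvLoopA_cons (graph : List (String × List String)) (node : String) (d : Int)
    (rest : List (String × Int)) (seen : PySem.Set String) :
    pvLoopA graph ((node, d) :: rest) seen =
      if seen.contains node = true ∨ d ≤ 0 ∨ PySem.Str.startswith node "great_expectations" = false then
        pvLoopA graph rest seen
      else
        pvLoopA graph
          (((PySem.Dict.getD (PySem.Dict.mk graph) node []).map (fun c => (c, d - 1))).reverse ++ rest)
          (PySem.Set.add seen node) := by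
  rw [pvLoopA]

-- the bridge: running A's loop on one pending entry equals B's recursive visit of it,
-- and on a block of same-depth entries equals B's child loop
lemma pvLoopA_eq_visit (graph : List (String × List String)) :
    (∀ (node : String) (d : Int) (seen : PySem.Set String) (rest : List (String × Int)),
      pvLoopA graph ((node, d) :: rest) seen = pvLoopA graph rest (pvVisit graph node d seen))
    := by
  have main : ∀ (node : String) (d : Int) (seen : PySem.Set String),
      (∀ rest, pvLoopA graph ((node, d) :: rest) seen = pvLoopA graph rest (pvVisit graph node d seen)) := by
    intro node d seen
    refine pvVisit.induct graph
      (motive1 := fun node d seen => ∀ rest,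
        pvLoopA graph ((node, d) :: rest) seen = pvLoopA graph rest (pvVisit graph node d seen))
      (motive2 := fun cs d seen => ∀ rest,
        pvLoopA graph ((cs.map (fun c => (c, d))) ++ rest) seen =
          pvLoopA graph rest (pvVisitList graph cs d seen))
      ?_ ?_ ?_ ?_ node d seen
    · intro node d seen hguard rest
      rw [pvLoopA_cons, if_pos hguard, pvVisit, if_pos hguard]
    · intro node d seen hguard ih rest
      rw [pvLoopA_cons, if_neg hguard, pvVisit, if_neg hguard]
      have hrw : ((PySem.Dict.getD (PySem.Dict.mk graph) node []).map (fun c => (c, d - 1))).reverse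
          = ((PySem.Dict.getD (PySem.Dict.mk graph) node []).reverse).map (fun c => (c, d - 1)) := by
        simp [List.map_reverse]
      rw [hrw]
      exact ih rest
    · intro d seen rest
      simp only [List.map_nil, List.nil_append]
      rw [pvVisitList]
    · intro d seen c cs ih1 ih2 rest
      simp only [List.map_cons, List.cons_append]
      rw [ih1 ((cs.map (fun c => (c, d))) ++ rest), ih2 rest, pvVisitList]
  exact fun node d seen rest => main node d seen rest

-- ===== VERDICT (by name: the statement is the Claim_ definition above) =====
theorem traverse_graph_spec : Claim_equal_traverse_graph := by
  unfold Claim_equal_traverse_graph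
  intro root graph depth _
  unfold Spec_traverse_graph traverse_graph traverse_graph_alt
  rw [pvLoopA_eq_visit graph root depth PySem.Set.empty [], pvLoopA_nil]
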